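-- pv_equiv track=rewrite | github.com/Yuzuctus/Nectar-Render | src/nectar_render/adapters/rendering/image_references.py | _is_position_in_inline_code
-- ===== SOURCE A (Python) =====
-- def _is_position_in_inline_code(line: str, position: int) -> bool:
--     i = 0
--     while i < len(line):
--         if line[i] != "`":
--             i += 1
--             continue
--
--         opener_start = i
--         opener_len = 0
--         while i < len(line) and line[i] == "`":
--             opener_len += 1
--             i += 1
--
--         j = i
--         while j < len(line):
--             if line[j] != "`":
--                 j += 1
--                 continue
--             closer_start = j
--             closer_len = 0
--             while j < len(line) and line[j] == "`":
--                 closer_len += 1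
--                 j += 1
--             if closer_len == opener_len:
--                 code_start = opener_start + opener_len
--                 code_end = closer_start
--                 if code_start <= position < code_end:
--                     return True
--                 i = j
--                 break
--         else:
--             return False
--
--     return False
-- ===== SOURCE B (Python) =====
-- def _is_position_in_inline_code(line: str, position: int) -> bool:
--     # One sweep tokenizes the line into maximal backtick runs, then a
--     # separate pass matches openers with the first equal-length closer.
--     runs = []
--     n = len(line)
--     k = 0
--     while k < n:
--         if line[k] == "`":
--             start = k
--             while k < n and line[k] == "`":
--                 k += 1
--             runs.append((start, k - start))
--         else:
--             k += 1
--
--     idx = 0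
--     while idx < len(runs):
--         start, length = runs[idx]
--         match = next((j for j in range(idx + 1, len(runs))
--                       if runs[j][1] == length), None)
--         if match is None:
--             return False
--         if start + length <= position < runs[match][0]:
--             return True
--         idx = match + 1
--     return False
-- ===== Notes on version B (the rewrite author's own statement) =====
-- stated objective: simpler
-- what changed: B first tokenizes the line into a list of maximal backtick runs (start, length) in one sweep, then pairs openers with the first later equal-length run over that list, replacing A's nested index-juggling while loops with a tokenize-then-match decomposition.
import Mathlib
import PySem

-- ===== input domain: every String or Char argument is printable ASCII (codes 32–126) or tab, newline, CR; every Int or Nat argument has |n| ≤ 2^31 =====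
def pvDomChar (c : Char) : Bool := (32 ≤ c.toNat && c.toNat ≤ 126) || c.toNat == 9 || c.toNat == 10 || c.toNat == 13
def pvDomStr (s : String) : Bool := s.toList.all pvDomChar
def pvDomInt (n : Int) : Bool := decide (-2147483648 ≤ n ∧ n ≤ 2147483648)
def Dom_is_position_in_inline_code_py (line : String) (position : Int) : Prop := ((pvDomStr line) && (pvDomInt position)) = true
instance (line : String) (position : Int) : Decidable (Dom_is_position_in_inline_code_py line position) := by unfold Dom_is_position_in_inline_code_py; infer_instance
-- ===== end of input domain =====

-- B tokenizes the line into maximal backtick runs first and then matches openers with the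
-- first later equal-length run over that run list (objective: simpler decomposition).
-- Loops are ported as fuel-indexed structural recursions; the fuel is a totality guard
-- only, always chosen large enough that it never runs out on the Python's control path.

-- ===== PORT A =====

-- length of the maximal backtick run starting at index i (the Python `while … == "`"` counters);
-- called with exact fuel cs.length - i, so the fuel never runs out
def pvRunLen (fuel : Nat) (cs : List Char) (i : Nat) : Nat :=
  match fuel with
  | 0 => 0
  | f + 1 =>
    if h : i < cs.length then
      if cs[i] = '`' then pvRunLen f cs (i + 1) + 1 else 0
    else 0

-- A's inner `while j < len(line)` loop: none = loop exhausted (Python's `else: return False`),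
-- some (b, j') = equal-length closer found, b = position inside the span, j' = index past the closer
def pvAInner (fuel : Nat) (cs : List Char) (pos : Int) (olen os j : Nat) : Option (Bool × Nat) :=
  match fuel with
  | 0 => none
  | f + 1 =>
    if h : j < cs.length then
      if cs[j] = '`' then
        if pvRunLen (cs.length - j) cs j = olen then
          if ((os + olen : Nat) : Int) ≤ pos ∧ pos < ((j : Nat) : Int) then
            some (true, j + pvRunLen (cs.length - j) cs j)
          else some (false, j + pvRunLen (cs.length - j) cs j)
        else pvAInner f cs pos olen os (j + pvRunLen (cs.length - j) cs j)
      else pvAInner f cs pos olen os (j + 1)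
    else none

-- A's outer `while i < len(line)` loop
def pvALoop (fuel : Nat) (cs : List Char) (pos : Int) (i : Nat) : Bool :=
  match fuel with
  | 0 => false
  | f + 1 =>
    if h : i < cs.length then
      if cs[i] = '`' then
        match pvAInner f cs pos (pvRunLen (cs.length - i) cs i) i (i + pvRunLen (cs.length - i) cs i) with
        | none => false
        | some (true, _) => true
        | some (false, j') => pvALoop f cs pos j'
      else pvALoop f cs pos (i + 1)
    else false

def is_position_in_inline_code_py (line : String) (position : Int) : Bool :=
  pvALoop (line.toList.length + 1) line.toList position 0

-- ===== PORT B =====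

-- the sweep building the list of maximal backtick runs as (start, length)
def pvBRuns (fuel : Nat) (cs : List Char) (k : Nat) : List (Nat × Nat) :=
  match fuel with
  | 0 => []
  | f + 1 =>
    if h : k < cs.length then
      if cs[k] = '`' then
        (k, pvRunLen (cs.length - k) cs k) :: pvBRuns f cs (k + pvRunLen (cs.length - k) cs k)
      else pvBRuns f cs (k + 1)
    else []

-- `next((j for j in range(idx+1, …) if runs[j][1] == length), None)`: first later run of
-- equal length, returned together with the remaining runs after it
def pvBFind (l : Nat) : List (Nat × Nat) → Option (Nat × List (Nat × Nat))
  | [] => none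
  | (s, len) :: rest => if len = l then some (s, rest) else pvBFind l rest

-- B's `while idx < len(runs)` loop over the run list
def pvBMatch (fuel : Nat) (pos : Int) (runs : List (Nat × Nat)) : Bool :=
  match fuel with
  | 0 => false
  | f + 1 =>
    match runs with
    | [] => false
    | (s, l) :: rest =>
      match pvBFind l rest with
      | none => false
      | some (ms, rest') =>
        if ((s + l : Nat) : Int) ≤ pos ∧ pos < ((ms : Nat) : Int) then true
        else pvBMatch f pos rest'

def is_position_in_inline_code_py_alt (line : String) (position : Int) : Bool :=
  pvBMatch ((pvBRuns (line.toList.length + 1) line.toList 0).length + 1) position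
    (pvBRuns (line.toList.length + 1) line.toList 0)

-- ===== PRECONDITION & SPEC =====
def Spec_is_position_in_inline_code_py (line : String) (position : Int) (out : Bool) : Prop := out = is_position_in_inline_code_py_alt line position
instance (line : String) (position : Int) (out : Bool) : Decidable (Spec_is_position_in_inline_code_py line position out) := by unfold Spec_is_position_in_inline_code_py; infer_instance

-- ===== CLAIM (what is proved, stated in full; the proofs are below) =====
def Claim_equal_is_position_in_inline_code_py : Prop := ∀ (line : String) (position : Int), Dom_is_position_in_inline_code_py line position → Spec_is_position_in_inline_code_py line position (is_position_in_inline_code_py line position)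

-- ===== LEMMAS AND PROOFS =====

theorem pvBMatch_nil (fuel : Nat) (pos : Int) : pvBMatch fuel pos [] = false := by
  cases fuel <;> rfl

theorem pvBMatch_cons (f : Nat) (pos : Int) (s l : Nat) (rest : List (Nat × Nat)) :
    pvBMatch (f + 1) pos ((s, l) :: rest) =
      match pvBFind l rest with
      | none => false
      | some (ms, rest') =>
        if ((s + l : Nat) : Int) ≤ pos ∧ pos < ((ms : Nat) : Int) then true
        else pvBMatch f pos rest' := rfl

theorem pvBFind_cons (l s len : Nat) (rest : List (Nat × Nat)) :
    pvBFind l ((s, len) :: rest) = if len = l then some (s, rest) else pvBFind l rest := rfl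

theorem pvRunLen_pos (cs : List Char) (i : Nat) (h : i < cs.length) (hc : cs[i] = '`') :
    1 ≤ pvRunLen (cs.length - i) cs i := by
  obtain ⟨f, hf⟩ : ∃ f, cs.length - i = f + 1 := ⟨cs.length - i - 1, by omega⟩
  rw [hf]
  simp [pvRunLen, h, hc]

theorem pvAInner_lt (cs : List Char) (pos : Int) (olen os : Nat) :
    ∀ fuel j b j', pvAInner fuel cs pos olen os j = some (b, j') → j < j' := by
  intro fuel
  induction fuel with
  | zero => intro j b j' hj; simp [pvAInner] at hj
  | succ f ih =>
    intro j b j' hj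
    unfold pvAInner at hj
    split at hj
    · rename_i h
      split at hj
      · rename_i hc
        have hr := pvRunLen_pos cs j h hc
        split at hj
        · split at hj <;> (simp only [Option.some.injEq, Prod.mk.injEq] at hj; omega)
        · have := ih _ b j' hj; omega
      · have := ih _ b j' hj; omega
    · simp at hj

theorem pvBRuns_length (cs : List Char) :
    ∀ fuel k, (pvBRuns fuel cs k).length ≤ cs.length - k := by
  intro fuel
  induction fuel with
  | zero => intro k; simp [pvBRuns]
  | succ f ih =>
    intro k
    unfold pvBRuns
    split
    · rename_i h
      split
      · rename_i hc
        have hr := pvRunLen_pos cs k h hc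
        have := ih (k + pvRunLen (cs.length - k) cs k)
        simp only [List.length_cons]
        omega
      · have := ih (k + 1); omega
    · simp

theorem pvBRuns_stable (cs : List Char) :
    ∀ f g k, cs.length - k ≤ f → cs.length - k ≤ g → pvBRuns f cs k = pvBRuns g cs k := by
  intro f
  induction f with
  | zero =>
    intro g k hf hg
    have hk : ¬ k < cs.length := by omega
    cases g <;> simp [pvBRuns, hk]
  | succ f ih =>
    intro g k hf hg
    by_cases hk : k < cs.length
    · obtain ⟨g', rfl⟩ : ∃ g', g = g' + 1 := ⟨g - 1, by omega⟩
      by_cases hc : cs[k] = '`'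
      · have hr := pvRunLen_pos cs k hk hc
        unfold pvBRuns
        rw [dif_pos hk, dif_pos hk, if_pos hc, if_pos hc]
        rw [ih g' (k + pvRunLen (cs.length - k) cs k) (by omega) (by omega)]
      · unfold pvBRuns
        rw [dif_pos hk, dif_pos hk, if_neg hc, if_neg hc]
        exact ih g' (k + 1) (by omega) (by omega)
    · have e1 : pvBRuns (f + 1) cs k = [] := by unfold pvBRuns; rw [dif_neg hk]
      have e2 : pvBRuns g cs k = [] := by
        cases g with
        | zero => rfl
        | succ g' => unfold pvBRuns; rw [dif_neg hk]
      rw [e1, e2]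

theorem pvBFind_length (l : Nat) : ∀ rs s rest', pvBFind l rs = some (s, rest') →
    rest'.length < rs.length := by
  intro rs
  induction rs with
  | nil => intro s rest' h; simp [pvBFind] at h
  | cons hd tl ih =>
    intro s rest' h
    obtain ⟨hs, hl⟩ := hd
    unfold pvBFind at h
    split at h
    · simp_all
    · have := ih s rest' h; simp; omega

theorem pvBMatch_stable (pos : Int) :
    ∀ f g runs, runs.length ≤ f → runs.length ≤ g → pvBMatch f pos runs = pvBMatch g pos runs := by
  intro f
  induction f with
  | zero =>
    intro g runs hf hg
    have : runs = [] := by cases runs <;> simp_all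
    subst this
    cases g <;> simp [pvBMatch]
  | succ f ih =>
    intro g runs hf hg
    cases runs with
    | nil => cases g <;> simp [pvBMatch]
    | cons hd tl =>
      obtain ⟨s, l⟩ := hd
      have hf' : tl.length + 1 ≤ f + 1 := by simpa using hf
      obtain ⟨g', rfl⟩ : ∃ g', g = g' + 1 := ⟨g - 1, by simp at hg; omega⟩
      have hg' : tl.length + 1 ≤ g' + 1 := by simpa using hg
      rw [pvBMatch_cons, pvBMatch_cons]
      cases hfind : pvBFind l tl with
      | none => rfl
      | some p =>
        obtain ⟨ms, rest'⟩ := p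
        have hlen := pvBFind_length l tl ms rest' hfind
        show (if ((s + l : Nat) : Int) ≤ pos ∧ pos < ((ms : Nat) : Int) then true
            else pvBMatch f pos rest') =
          (if ((s + l : Nat) : Int) ≤ pos ∧ pos < ((ms : Nat) : Int) then true
            else pvBMatch g' pos rest')
        rw [ih g' rest' (by omega) (by omega)]

-- A's inner closer-search loop computes exactly B's first-equal-length-run search over the
-- run list of the suffix starting at j (fuel tracked on both sides in lockstep)
theorem pvInner_corr (cs : List Char) (pos : Int) (olen os : Nat) :
    ∀ fuel j, cs.length - j ≤ fuel →
      (pvAInner fuel cs pos olen os j = none → pvBFind olen (pvBRuns fuel cs j) = none) ∧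
      (∀ b j', pvAInner fuel cs pos olen os j = some (b, j') →
        ∃ ms f', f' < fuel ∧ cs.length - j' ≤ f' ∧
          pvBFind olen (pvBRuns fuel cs j) = some (ms, pvBRuns f' cs j') ∧
          b = decide (((os + olen : Nat) : Int) ≤ pos ∧ pos < ((ms : Nat) : Int))) := by
  intro fuel
  induction fuel with
  | zero =>
    intro j hj
    refine ⟨fun _ => by simp [pvBRuns, pvBFind], fun b j' hsome => ?_⟩
    simp [pvAInner] at hsome
  | succ f ih =>
    intro j hj
    by_cases h : j < cs.length
    · by_cases hc : cs[j] = '`'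
      · have hr := pvRunLen_pos cs j h hc
        have hruns : pvBRuns (f + 1) cs j =
            (j, pvRunLen (cs.length - j) cs j) :: pvBRuns f cs (j + pvRunLen (cs.length - j) cs j) := by
          conv_lhs => unfold pvBRuns
          rw [dif_pos h, if_pos hc]
        by_cases hl : pvRunLen (cs.length - j) cs j = olen
        · have hA : pvAInner (f + 1) cs pos olen os j =
              if ((os + olen : Nat) : Int) ≤ pos ∧ pos < ((j : Nat) : Int) then
                some (true, j + pvRunLen (cs.length - j) cs j)
              else some (false, j + pvRunLen (cs.length - j) cs j) := by
            conv_lhs => unfold pvAInner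
            rw [dif_pos h, if_pos hc, if_pos hl]
          constructor
          · intro hnone; rw [hA] at hnone; split at hnone <;> simp at hnone
          · intro b j' hsome
            rw [hA] at hsome
            have hj' : j' = j + pvRunLen (cs.length - j) cs j := by
              split at hsome <;> simp_all
            refine ⟨j, f, by omega, by omega, ?_, ?_⟩
            · rw [hruns, hj', pvBFind_cons, if_pos hl]
            · split at hsome <;> simp_all
        · have hA : pvAInner (f + 1) cs pos olen os j =
              pvAInner f cs pos olen os (j + pvRunLen (cs.length - j) cs j) := by
            conv_lhs => unfold pvAInner
            rw [dif_pos h, if_pos hc, if_neg hl]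
          have hfind : pvBFind olen (pvBRuns (f + 1) cs j) =
              pvBFind olen (pvBRuns f cs (j + pvRunLen (cs.length - j) cs j)) := by
            rw [hruns, pvBFind_cons, if_neg hl]
          have hrec := ih (j + pvRunLen (cs.length - j) cs j) (by omega)
          constructor
          · intro hnone; rw [hA] at hnone; rw [hfind]; exact hrec.1 hnone
          · intro b j' hsome
            rw [hA] at hsome
            obtain ⟨ms, f', hf', hj', hfind', hb⟩ := hrec.2 b j' hsome
            exact ⟨ms, f', by omega, hj', by rw [hfind]; exact hfind', hb⟩
      · have hA : pvAInner (f + 1) cs pos olen os j = pvAInner f cs pos olen os (j + 1) := by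
          conv_lhs => unfold pvAInner
          rw [dif_pos h, if_neg hc]
        have hruns : pvBRuns (f + 1) cs j = pvBRuns f cs (j + 1) := by
          conv_lhs => unfold pvBRuns
          rw [dif_pos h, if_neg hc]
        have hrec := ih (j + 1) (by omega)
        constructor
        · intro hnone; rw [hA] at hnone; rw [hruns]; exact hrec.1 hnone
        · intro b j' hsome
          rw [hA] at hsome
          obtain ⟨ms, f', hf', hj', hfind', hb⟩ := hrec.2 b j' hsome
          exact ⟨ms, f', by omega, hj', by rw [hruns]; exact hfind', hb⟩
    · have hruns : pvBRuns (f + 1) cs j = [] := by unfold pvBRuns; rw [dif_neg h]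
      have hA : pvAInner (f + 1) cs pos olen os j = none := by
        unfold pvAInner; rw [dif_neg h]
      exact ⟨fun _ => by rw [hruns]; rfl, fun b j' hsome => by rw [hA] at hsome; cases hsome⟩

-- A's outer loop equals B's matcher over the run list of the suffix starting at i
theorem pvLoop_eq (cs : List Char) (pos : Int) :
    ∀ f i, cs.length ≤ f + i →
      pvALoop (f + 1) cs pos i = pvBMatch (f + 1) pos (pvBRuns (f + 1) cs i) := by
  intro f
  induction f using Nat.strong_induction_on with
  | _ f ih =>
    intro i hfi
    by_cases hi : i < cs.length
    · obtain ⟨f', rfl⟩ : ∃ f', f = f' + 1 := ⟨f - 1, by omega⟩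
      by_cases hc : cs[i] = '`'
      · have hr := pvRunLen_pos cs i hi hc
        have hruns : pvBRuns (f' + 1 + 1) cs i =
            (i, pvRunLen (cs.length - i) cs i) :: pvBRuns (f' + 1) cs (i + pvRunLen (cs.length - i) cs i) := by
          conv_lhs => unfold pvBRuns
          rw [dif_pos hi, if_pos hc]
        have hA : pvALoop (f' + 1 + 1) cs pos i =
            match pvAInner (f' + 1) cs pos (pvRunLen (cs.length - i) cs i) i
                (i + pvRunLen (cs.length - i) cs i) with
            | none => false
            | some (true, _) => true
            | some (false, j') => pvALoop (f' + 1) cs pos j' := by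
          conv_lhs => unfold pvALoop
          rw [dif_pos hi, if_pos hc]
        have hcorr := pvInner_corr cs pos (pvRunLen (cs.length - i) cs i) i (f' + 1)
          (i + pvRunLen (cs.length - i) cs i) (by omega)
        rw [hA, hruns]
        cases hm : pvAInner (f' + 1) cs pos (pvRunLen (cs.length - i) cs i) i
            (i + pvRunLen (cs.length - i) cs i) with
        | none =>
          have hfind := hcorr.1 hm
          rw [pvBMatch_cons, hfind]
        | some p =>
          obtain ⟨b, j'⟩ := p
          obtain ⟨ms, fm, hfm, hj'm, hfind, hb⟩ := hcorr.2 b j' hm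
          have hlt := pvAInner_lt cs pos (pvRunLen (cs.length - i) cs i) i (f' + 1) _ b j' hm
          cases b with
          | true =>
            have hcond : ((i + pvRunLen (cs.length - i) cs i : Nat) : Int) ≤ pos ∧
                pos < ((ms : Nat) : Int) := by
              have := hb.symm; simpa using this
            rw [pvBMatch_cons, hfind]
            show true = if ((i + pvRunLen (cs.length - i) cs i : Nat) : Int) ≤ pos ∧
                pos < ((ms : Nat) : Int) then true else pvBMatch (f' + 1) pos (pvBRuns fm cs j')
            rw [if_pos hcond]
          | false =>
            have hcond : ¬ (((i + pvRunLen (cs.length - i) cs i : Nat) : Int) ≤ pos ∧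
                pos < ((ms : Nat) : Int)) := by
              have := hb.symm; simpa using this
            rw [pvBMatch_cons, hfind]
            show pvALoop (f' + 1) cs pos j' = if ((i + pvRunLen (cs.length - i) cs i : Nat) : Int) ≤ pos ∧
                pos < ((ms : Nat) : Int) then true else pvBMatch (f' + 1) pos (pvBRuns fm cs j')
            rw [if_neg hcond, pvBRuns_stable cs fm (f' + 1) j' hj'm (by omega)]
            exact ih f' (by omega) j' (by omega)
      · have hA : pvALoop (f' + 1 + 1) cs pos i = pvALoop (f' + 1) cs pos (i + 1) := by
          conv_lhs => unfold pvALoop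
          rw [dif_pos hi, if_neg hc]
        have hruns : pvBRuns (f' + 1 + 1) cs i = pvBRuns (f' + 1) cs (i + 1) := by
          conv_lhs => unfold pvBRuns
          rw [dif_pos hi, if_neg hc]
        rw [hA, hruns]
        rw [ih f' (by omega) (i + 1) (by omega)]
        exact pvBMatch_stable pos (f' + 1) (f' + 1 + 1) (pvBRuns (f' + 1) cs (i + 1))
          (by have := pvBRuns_length cs (f' + 1) (i + 1); omega)
          (by have := pvBRuns_length cs (f' + 1) (i + 1); omega)
    · have hruns : pvBRuns (f + 1) cs i = [] := by unfold pvBRuns; rw [dif_neg hi]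
      have hA : pvALoop (f + 1) cs pos i = false := by unfold pvALoop; rw [dif_neg hi]
      rw [hA, hruns, pvBMatch_nil]

-- ===== VERDICT (by name: the statement is the Claim_ definition above) =====
theorem is_position_in_inline_code_py_spec : Claim_equal_is_position_in_inline_code_py := by
  intro line position _
  unfold Spec_is_position_in_inline_code_py is_position_in_inline_code_py is_position_in_inline_code_py_alt
  rw [pvLoop_eq line.toList position line.toList.length 0 (by omega)]
  exact pvBMatch_stable position (line.toList.length + 1)
    ((pvBRuns (line.toList.length + 1) line.toList 0).length + 1)
    (pvBRuns (line.toList.length + 1) line.toList 0)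
    (by have := pvBRuns_length line.toList (line.toList.length + 1) 0; omega)
    (by omega)
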